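-- pv_equiv track=rewrite | github.com/Ravi-0412/DSA-Program-And-Notes | Hashing/2453. Destroy Sequential Targets.py | destroyTargets
-- ===== SOURCE A (Python) =====
-- from typing import List
--
-- def destroyTargets(nums: List[int], space: int) -> int:
--
--     def maxTargets(num):
--         count = 0
--         for i in range(len(nums)):
--             if nums[i] not in visited:
--                 if (nums[i] - num) % space == 0:
--                     count += 1
--         return count
--
--     nums.sort()
--     max_target, ans = 0, None
--     visited = set()  # No need to start from same number again
--     for i in range(len(nums)):
--         if nums[i] not in visited:
--
--             targets = maxTargets(nums[i])
--             if targets > max_target: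
--                 ans = nums[i]
--                 max_target = targets
--         visited.add(nums[i])
--     return ans
-- ===== SOURCE B (Python) =====
-- from typing import List
--
-- def destroyTargets(nums: List[int], space: int) -> int:
--     groups = {}  # remainder -> (count, min value)
--     for x in nums:
--         r = x % space
--         if r in groups:
--             c, m = groups[r]
--             groups[r] = (c + 1, x if x < m else m)
--         else:
--             groups[r] = (1, x)
--     best = None  # (count, value)
--     for c, m in groups.values():
--         if best is None or c > best[0] or (c == best[0] and m < best[1]):
--             best = (c, m)
--     return None if best is None else best[1]
-- ===== Notes on version B (the rewrite author's own statement) =====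
-- stated objective: faster
-- what changed: replaces sort + visited-set + full rescan per distinct value with a single hash pass keeping (count, min value) per remainder class, then one pass picking max count with min-value tie-break
import Mathlib
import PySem

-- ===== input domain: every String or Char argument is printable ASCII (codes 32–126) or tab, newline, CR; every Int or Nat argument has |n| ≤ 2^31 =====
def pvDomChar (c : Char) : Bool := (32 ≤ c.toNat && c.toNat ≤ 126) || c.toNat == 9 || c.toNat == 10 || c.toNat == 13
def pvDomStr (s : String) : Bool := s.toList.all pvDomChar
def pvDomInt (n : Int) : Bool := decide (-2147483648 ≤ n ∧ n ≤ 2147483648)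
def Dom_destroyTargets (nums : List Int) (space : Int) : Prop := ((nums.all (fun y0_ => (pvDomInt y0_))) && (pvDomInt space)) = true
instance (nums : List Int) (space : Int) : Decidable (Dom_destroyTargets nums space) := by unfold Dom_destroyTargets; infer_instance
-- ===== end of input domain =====

-- B replaces A's sort + visited-set + full rescan per distinct value by one hash pass keeping
-- (count, min value) per remainder class and a selection pass (max count, min value tie-break).
-- A sorts `nums` in place; the equivalence proved here is about the RETURN value only.

-- ===== PORT A =====
-- Python's nested `def maxTargets(num)`: scan all of nums, count unvisited values in num's class.
def dtMaxTargets (numsL : List Int) (visited : PySem.Set Int) (space num : Int) : Int :=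
  numsL.foldl (fun count x =>
    if PySem.Set.contains visited x then count
    else if PySem.Int.mod (x - num) space = 0 then count + 1 else count) 0

-- the body of A's main `for` loop; state = (max_target, ans, visited)
def dtStep (numsL : List Int) (space : Int)
    (st : Int × Option Int × PySem.Set Int) (x : Int) : Int × Option Int × PySem.Set Int :=
  if PySem.Set.contains st.2.2 x then (st.1, st.2.1, PySem.Set.add st.2.2 x)
  else
    let targets := dtMaxTargets numsL st.2.2 space x
    if targets > st.1 then (targets, some x, PySem.Set.add st.2.2 x)
    else (st.1, st.2.1, PySem.Set.add st.2.2 x)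

def destroyTargets (nums : List Int) (space : Int) : Option Int :=
  let numsL := PySem.List.sorted nums (fun x => x) false   -- nums.sort()
  let st := numsL.foldl (dtStep numsL space) (0, none, PySem.Set.empty)
  st.2.1

-- ===== PORT B =====
-- body of B's grouping loop: groups[r] = (count, min value) per remainder r = x % space
def bGroupStep (space : Int) (d : PySem.Dict Int (Int × Int)) (x : Int) : PySem.Dict Int (Int × Int) :=
  let r := PySem.Int.mod x space
  match d.get? r with
  | some (c, m) => d.insert r (c + 1, if x < m then x else m)
  | none => d.insert r (1, x)

-- body of B's selection loop over groups.values()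
def bBestStep (best : Option (Int × Int)) (p : Int × Int) : Option (Int × Int) :=
  match best with
  | none => some p
  | some q => if p.1 > q.1 ∨ (p.1 = q.1 ∧ p.2 < q.2) then some p else some q

def destroyTargets_alt (nums : List Int) (space : Int) : Option Int :=
  let groups := nums.foldl (bGroupStep space) PySem.Dict.empty
  match (PySem.Dict.values groups).foldl bBestStep none with
  | none => none
  | some p => some p.2

-- ===== PRECONDITION & SPEC =====
-- Pre_ excludes exactly the inputs where Python raises: x % 0 (ZeroDivisionError) is reached
-- by both programs as soon as nums is nonempty, so space = 0 is admitted only with nums = [].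
def Pre_destroyTargets (nums : List Int) (space : Int) : Prop := space ≠ 0 ∨ nums = []
instance (nums : List Int) (space : Int) : Decidable (Pre_destroyTargets nums space) := by
  unfold Pre_destroyTargets; infer_instance

def pvWitness_destroyTargets : List Int × Int := ([3, 7, 8, 1, 1, 5], 2)

def Spec_destroyTargets (nums : List Int) (space : Int) (out : Option Int) : Prop := out = destroyTargets_alt nums space
instance (nums : List Int) (space : Int) (out : Option Int) : Decidable (Spec_destroyTargets nums space out) := by unfold Spec_destroyTargets; infer_instance

-- ===== CLAIM (what is proved, stated in full; the proofs are below) =====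
def Claim_equal_destroyTargets : Prop := ∀ (nums : List Int) (space : Int), Dom_destroyTargets nums space → Pre_destroyTargets nums space → Spec_destroyTargets nums space (destroyTargets nums space)

-- ===== LEMMAS AND PROOFS =====

-- strict "is a better answer" order on (count, value) pairs: more targets, then smaller value
def dtBetter (p q : Int × Int) : Prop := q.1 < p.1 ∨ (p.1 = q.1 ∧ p.2 < q.2)

-- B's selection loop as a function of the candidate list
def dtPick (l : List (Int × Int)) : Option (Int × Int) := l.foldl bBestStep none

-- candidates A accumulates over the distinct values of the processed prefix P (counts w.r.t. full L)
def dtTl (s : Int) (L P : List Int) : List (Int × Int) :=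
  (PySem.Set.ofList P).map (fun v => ((L.countP (fun y => decide (v ≤ y ∧ s ∣ (y - v))) : Int), v))

-- A's loop state, as a function of the candidate list picked so far and the visited set
def dtEnc (b : Option (Int × Int)) (vis : PySem.Set Int) : Int × Option Int × PySem.Set Int :=
  ((b.map Prod.fst).getD 0, b.map Prod.snd, vis)

theorem dtBetter_total {p q : Int × Int} (h1 : ¬ dtBetter p q) (h2 : ¬ dtBetter q p) : p = q := by
  unfold dtBetter at *
  exact Prod.ext (by omega) (by omega)

theorem dtPick_step (l : List (Int × Int)) (p : Int × Int) :
    dtPick (l ++ [p]) = bBestStep (dtPick l) p := by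
  simp [dtPick, List.foldl_append]

theorem dtPick_none_iff (l : List (Int × Int)) : dtPick l = none ↔ l = [] := by
  induction l using List.reverseRecOn with
  | nil => simp [dtPick]
  | append_singleton l p ih =>
    rw [dtPick_step]
    cases h : dtPick l <;> simp [bBestStep]
    split <;> simp

theorem dtPick_min {l : List (Int × Int)} {m : Int × Int} (h : dtPick l = some m) :
    m ∈ l ∧ ∀ q ∈ l, ¬ dtBetter q m := by
  induction l using List.reverseRecOn generalizing m with
  | nil => simp [dtPick] at h
  | append_singleton l p ih =>
    rw [dtPick_step] at h
    cases hl : dtPick l with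
    | none =>
      have : l = [] := (dtPick_none_iff l).1 hl
      subst this
      simp [dtPick, bBestStep] at h
      subst h
      simp [dtBetter]
    | some q =>
      rw [hl] at h
      obtain ⟨hmem, hmin⟩ := ih hl
      by_cases hb : p.1 > q.1 ∨ (p.1 = q.1 ∧ p.2 < q.2)
      · simp [bBestStep, hb] at h
        subst h
        constructor
        · simp
        · intro r hr
          rcases List.mem_append.1 hr with hr | hr
          · have := hmin r hr
            unfold dtBetter at *
            omega
          · simp at hr; subst hr; unfold dtBetter; omega
      · simp [bBestStep, hb] at h
        subst h
        constructor
        · exact List.mem_append.2 (Or.inl hmem)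
        · intro r hr
          rcases List.mem_append.1 hr with hr | hr
          · exact hmin r hr
          · simp at hr; subst hr; unfold dtBetter at *; omega

theorem dtPick_eq_of {l : List (Int × Int)} {p : Int × Int} (hp : p ∈ l)
    (hmin : ∀ q ∈ l, ¬ dtBetter q p) : dtPick l = some p := by
  cases h : dtPick l with
  | none =>
    rw [dtPick_none_iff] at h; subst h; simp at hp
  | some m =>
    obtain ⟨hm, hminm⟩ := dtPick_min h
    have := dtBetter_total (hminm p hp) (hmin m hm)
    rw [this]

-- Python's `%` compares equal across a class exactly when the divisor divides the difference
theorem dtMod_sub_iff {s : Int} (hs : s ≠ 0) (y v : Int) :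
    PySem.Int.mod y s = PySem.Int.mod v s ↔ s ∣ (y - v) := by
  constructor
  · intro h
    have hy := PySem.Int.floordiv_mul_add_mod y s
    have hv := PySem.Int.floordiv_mul_add_mod v s
    have : y - v = (PySem.Int.floordiv y s - PySem.Int.floordiv v s) * s := by
      rw [h] at hy; nlinarith [hy, hv]
    exact ⟨PySem.Int.floordiv y s - PySem.Int.floordiv v s, by rw [this]; ring⟩
  · intro ⟨k, hk⟩
    have hy := PySem.Int.floordiv_mul_add_mod y s
    have hv := PySem.Int.floordiv_mul_add_mod v s
    set my := PySem.Int.mod y s with hmy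
    set mv := PySem.Int.mod v s with hmv
    have hdvd : s ∣ (my - mv) := by
      have : my - mv = s * k - (PySem.Int.floordiv y s - PySem.Int.floordiv v s) * s := by
        nlinarith [hy, hv, hk]
      rw [this]
      exact dvd_sub (Dvd.intro k rfl) (Dvd.intro_left _ rfl)
    have habs : |my - mv| < |s| := by
      rcases lt_or_gt_of_ne hs with hneg | hpos
      · have b1 := PySem.Int.mod_neg_bounds y (b := s) hneg
        have b2 := PySem.Int.mod_neg_bounds v (b := s) hneg
        rw [abs_of_neg hneg, abs_lt]
        omega
      · have b1 := PySem.Int.mod_nonneg y (b := s) hpos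
        have b2 := PySem.Int.mod_nonneg v (b := s) hpos
        have c1 := PySem.Int.mod_lt y (b := s) hpos
        have c2 := PySem.Int.mod_lt v (b := s) hpos
        rw [abs_of_pos hpos, abs_lt]
        omega
    have : my - mv = 0 := by
      by_contra hne
      have : |s| ≤ |my - mv| := Int.le_of_dvd (abs_pos.2 hne) ((abs_dvd _ _).2 ((dvd_abs _ _).2 hdvd))
      omega
    omega

-- within a sorted split L = P ++ x :: S with x ∉ P, membership in P is "< x"
theorem dt_mem_prefix_iff {L P S : List Int} {x : Int} (hL : L = P ++ x :: S)
    (hsorted : L.Pairwise (· ≤ ·)) (hx : x ∉ P) :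
    ∀ y ∈ L, (y ∈ P ↔ y < x) := by
  subst hL
  rw [List.pairwise_append] at hsorted
  obtain ⟨hP, hS, hcross⟩ := hsorted
  intro y hy
  constructor
  · intro hyP
    have h1 : y ≤ x := hcross y hyP x (by simp)
    have h2 : y ≠ x := fun h => hx (h ▸ hyP)
    omega
  · intro hlt
    rcases List.mem_append.1 hy with h | h
    · exact h
    · exfalso
      rcases List.mem_cons.1 h with rfl | h
      · omega
      · have := (List.pairwise_cons.1 hS).1 y h
        omega

-- A's inner scan at the first unvisited occurrence of x counts x's whole class from x up
theorem dtMaxTargets_eq {s : Int} {L P S : List Int} {x : Int}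
    (hL : L = P ++ x :: S) (hsorted : L.Pairwise (· ≤ ·)) (hx : x ∉ P) :
    dtMaxTargets L (PySem.Set.ofList P) s x
      = (L.countP (fun y => decide (x ≤ y ∧ s ∣ (y - x))) : Int) := by
  have hmem := dt_mem_prefix_iff hL hsorted hx
  unfold dtMaxTargets
  rw [PySem.List.foldl_congr_mem
    (g := fun count y => if x ≤ y ∧ s ∣ (y - x) then count + 1 else count)]
  · rw [PySem.List.foldl_ite_add_one]
    simp
  · intro count y hy
    have hPy : y ∈ P ↔ y < x := hmem y hy
    have hcont : PySem.Set.contains (PySem.Set.ofList P) y = true ↔ y ∈ P := by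
      rw [PySem.Set.contains_iff, PySem.Set.mem_ofList]
    by_cases hyP : y ∈ P
    · have h1 : PySem.Set.contains (PySem.Set.ofList P) y = true := hcont.2 hyP
      have h2 : ¬ (x ≤ y ∧ s ∣ (y - x)) := fun ⟨h1', _⟩ => by have := hPy.1 hyP; omega
      rw [if_pos h1, if_neg h2]
    · have h1 : PySem.Set.contains (PySem.Set.ofList P) y = false := by
        rw [Bool.eq_false_iff]; intro hcc; exact hyP (hcont.1 hcc)
      have hxy : x ≤ y := by have := mt hPy.2 hyP; omega
      simp only [h1, Bool.false_eq_true, if_false]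
      have hiff : PySem.Int.mod (y - x) s = 0 ↔ s ∣ (y - x) := PySem.Int.mod_eq_zero_iff_dvd _ _
      by_cases hd : s ∣ (y - x)
      · rw [if_pos (hiff.2 hd), if_pos ⟨hxy, hd⟩]
      · rw [if_neg (fun hh => hd (hiff.1 hh)), if_neg (fun hh => hd hh.2)]

theorem dt_tc_pos {s : Int} {L : List Int} {x : Int} (hxL : x ∈ L) :
    1 ≤ (L.countP (fun y => decide (x ≤ y ∧ s ∣ (y - x))) : Int) := by
  have : 0 < L.countP (fun y => decide (x ≤ y ∧ s ∣ (y - x))) := by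
    rw [List.countP_pos_iff]; exact ⟨x, hxL, by simp⟩
  omega

theorem dtTl_append_not_mem {s : Int} {L P : List Int} {x : Int} (hx : x ∉ P) :
    dtTl s L (P ++ [x]) = dtTl s L P ++ [((L.countP (fun y => decide (x ≤ y ∧ s ∣ (y - x))) : Int), x)] := by
  unfold dtTl
  rw [PySem.Set.ofList_append_singleton,
    PySem.Set.add_of_not_mem (by rw [PySem.Set.mem_ofList]; exact hx), List.map_append]
  simp

theorem dtTl_append_mem {s : Int} {L P : List Int} {x : Int} (hx : x ∈ P) :
    dtTl s L (P ++ [x]) = dtTl s L P := by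
  unfold dtTl
  rw [PySem.Set.ofList_append_singleton,
    PySem.Set.add_of_mem (by rw [PySem.Set.mem_ofList]; exact hx)]

theorem dtStep_mem {L : List Int} {s : Int} {b : Option (Int × Int)} {vis : PySem.Set Int}
    {x : Int} (hc : PySem.Set.contains vis x = true) :
    dtStep L s (dtEnc b vis) x = dtEnc b (PySem.Set.add vis x) := by
  unfold dtStep dtEnc
  rw [if_pos hc]

theorem dtStep_not_mem {L : List Int} {s : Int} {b : Option (Int × Int)} {vis : PySem.Set Int}
    {x : Int} (hc : PySem.Set.contains vis x = false) :
    dtStep L s (dtEnc b vis) x =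
      if dtMaxTargets L vis s x > (b.map Prod.fst).getD 0
      then dtEnc (some (dtMaxTargets L vis s x, x)) (PySem.Set.add vis x)
      else dtEnc b (PySem.Set.add vis x) := by
  unfold dtStep dtEnc
  rw [if_neg (by rw [hc]; simp)]
  dsimp only
  by_cases h : dtMaxTargets L vis s x > (b.map Prod.fst).getD 0
  · rw [if_pos h, if_pos h]; rfl
  · rw [if_neg h, if_neg h]

-- A's main loop keeps exactly the best (count, value) candidate over the distinct prefix values
theorem dt_afold_inv {s : Int} {L : List Int} (hsorted : L.Pairwise (· ≤ ·)) :
    ∀ (S P : List Int), L = P ++ S →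
      S.foldl (dtStep L s) (dtEnc (dtPick (dtTl s L P)) (PySem.Set.ofList P))
        = dtEnc (dtPick (dtTl s L L)) (PySem.Set.ofList L) := by
  intro S
  induction S with
  | nil => intro P hP; simp [hP]
  | cons x S' ih =>
    intro P hP
    have hvis : PySem.Set.ofList (P ++ [x]) = PySem.Set.add (PySem.Set.ofList P) x :=
      PySem.Set.ofList_append_singleton _ _
    have hstep : dtStep L s (dtEnc (dtPick (dtTl s L P)) (PySem.Set.ofList P)) x
        = dtEnc (dtPick (dtTl s L (P ++ [x]))) (PySem.Set.ofList (P ++ [x])) := by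
      by_cases hx : x ∈ P
      · have hc : PySem.Set.contains (PySem.Set.ofList P) x = true := by
          rw [PySem.Set.contains_iff, PySem.Set.mem_ofList]; exact hx
        rw [dtStep_mem hc, dtTl_append_mem hx, hvis]
      · have hc : PySem.Set.contains (PySem.Set.ofList P) x = false := by
          rw [Bool.eq_false_iff]
          intro hcc
          exact hx ((PySem.Set.mem_ofList _ _).1 ((PySem.Set.contains_iff _ _).1 hcc))
        have htg := dtMaxTargets_eq (s := s) hP hsorted hx
        set tc : Int := (L.countP (fun y => decide (x ≤ y ∧ s ∣ (y - x))) : Int) with htc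
        rw [dtStep_not_mem hc, htg, dtTl_append_not_mem hx, dtPick_step, hvis]
        cases hpk : dtPick (dtTl s L P) with
        | none =>
          have hxL : x ∈ L := by rw [hP]; simp
          have hpos := dt_tc_pos (s := s) hxL
          rw [if_pos (by simp only [Option.map_none, Option.getD_none]; omega)]
          rfl
        | some q =>
          obtain ⟨hqmem, _⟩ := dtPick_min hpk
          have hqP : q.2 ∈ P := by
            unfold dtTl at hqmem
            obtain ⟨v, hv, hveq⟩ := List.mem_map.1 hqmem
            have : q.2 = v := by rw [← hveq]
            rw [this]
            exact (PySem.Set.mem_ofList _ _).1 hv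
          have hq2lt : q.2 < x :=
            (dt_mem_prefix_iff hP hsorted hx q.2
              (by rw [hP]; exact List.mem_append.2 (Or.inl hqP))).1 hqP
          have hbs : bBestStep (some q) (tc, x) = if q.1 < tc then some (tc, x) else some q := by
            show (if (tc, x).1 > q.1 ∨ ((tc, x).1 = q.1 ∧ (tc, x).2 < q.2) then some (tc, x) else some q) = _
            by_cases hgt : q.1 < tc
            · rw [if_pos (Or.inl hgt), if_pos hgt]
            · rw [if_neg (by
                simp only [not_or]
                exact ⟨hgt, fun h => by have h2 : x < q.2 := h.2; omega⟩), if_neg hgt]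
          rw [hbs]
          simp only [Option.map_some, Option.getD_some]
          by_cases hgt : q.1 < tc
          · rw [if_pos (by exact hgt), if_pos hgt]
          · rw [if_neg (by exact hgt), if_neg hgt]
    rw [List.foldl_cons, hstep]
    exact ih (P ++ [x]) (by rw [hP]; simp)

-- ===== B-side: the dict after the grouping loop =====

theorem bGroupStep_eq (s : Int) (d : PySem.Dict Int (Int × Int)) (x : Int) :
    bGroupStep s d x = d.insert (PySem.Int.mod x s)
      (match d.get? (PySem.Int.mod x s) with
       | some p => (p.1 + 1, if x < p.2 then x else p.2)
       | none => (1, x)) := by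
  unfold bGroupStep
  cases h : d.get? (PySem.Int.mod x s) with
  | none => simp only [h]
  | some p => rcases p with ⟨c, m⟩; simp only [h]

theorem dtMin_if (x m : Int) : (if x < m then x else m) = min m x := by
  rw [min_def]; split_ifs <;> omega

theorem bGroup_get? (s : Int) (l : List Int) (r : Int) :
    (l.foldl (bGroupStep s) PySem.Dict.empty).get? r =
      match l.filter (fun x => decide (PySem.Int.mod x s = r)) with
      | [] => none
      | y :: ys => some ((ys.length : Int) + 1, ys.foldl min y) := by
  induction l using List.reverseRecOn with
  | nil => simp [PySem.Dict.get?_empty]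
  | append_singleton l x ih =>
    rw [List.foldl_append, List.foldl_cons, List.foldl_nil, bGroupStep_eq, List.filter_append]
    rw [PySem.Dict.get?_insert]
    by_cases hr : r = PySem.Int.mod x s
    · rw [if_pos hr]
      have hfx : List.filter (fun x => decide (PySem.Int.mod x s = r)) [x] = [x] := by
        simp [hr]
      rw [hfx]
      cases hf : l.filter (fun x => decide (PySem.Int.mod x s = r)) with
      | nil =>
        rw [hf] at ih
        rw [← hr, ih]
        simp
      | cons y ys =>
        rw [hf] at ih
        rw [← hr, ih]
        show some ((((ys.length : Nat) : Int) + 1) + 1, if x < ys.foldl min y then x else ys.foldl min y)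
          = some ((((ys ++ [x]).length : Nat) : Int) + 1, (ys ++ [x]).foldl min y)
        rw [List.foldl_append, List.foldl_cons, List.foldl_nil, dtMin_if]
        simp [List.length_append]
    · rw [if_neg hr]
      have hfx : List.filter (fun x => decide (PySem.Int.mod x s = r)) [x] = [] := by
        simp
        omega
      rw [hfx, List.append_nil]
      exact ih

theorem bGroup_keys (s : Int) (l : List Int) :
    (l.foldl (bGroupStep s) PySem.Dict.empty).keys
      = PySem.Set.ofList (l.map (fun x => PySem.Int.mod x s)) := by
  rw [PySem.List.foldl_congr_mem (g := fun d x => d.insert (PySem.Int.mod x s)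
    (match d.get? (PySem.Int.mod x s) with
     | some p => (p.1 + 1, if x < p.2 then x else p.2)
     | none => (1, x))) (h := fun d x _ => bGroupStep_eq s d x)]
  rw [PySem.Dict.keys_foldl_insert_key]
  simp [PySem.Dict.keys_empty, PySem.Set.update_nil_left]

theorem bGroup_values (s : Int) (l : List Int) :
    (l.foldl (bGroupStep s) PySem.Dict.empty).values
      = (PySem.Set.ofList (l.map (fun x => PySem.Int.mod x s))).map (fun r =>
          match l.filter (fun x => decide (PySem.Int.mod x s = r)) with
          | [] => ((0 : Int), (0 : Int))
          | y :: ys => ((ys.length : Int) + 1, ys.foldl min y)) := by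
  have hnd : (l.foldl (bGroupStep s) PySem.Dict.empty).keys.Nodup := by
    rw [bGroup_keys]; exact PySem.Set.nodup_ofList _
  rw [PySem.Dict.values_eq_map_keys _ hnd ((0 : Int), (0 : Int)), bGroup_keys]
  apply List.map_congr_left
  intro r hr
  obtain ⟨x0, hx0, hx0r⟩ := by
    have := (PySem.Set.mem_ofList _ _).1 hr
    exact List.mem_map.1 this
  have hx0f : x0 ∈ l.filter (fun x => decide (PySem.Int.mod x s = r)) :=
    List.mem_filter.2 ⟨hx0, by simp [hx0r]⟩
  rw [PySem.Dict.getD_eq_get?_getD, bGroup_get? s l r]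
  cases hf : l.filter (fun x => decide (PySem.Int.mod x s = r)) with
  | nil => rw [hf] at hx0f; simp at hx0f
  | cons y ys => rfl

-- the minimum of a nonempty filter: a member, satisfying the filter, below all such members
theorem dt_filter_min {l : List Int} {p : Int → Bool} {y : Int} {ys : List Int}
    (hf : l.filter p = y :: ys) :
    (ys.foldl min y) ∈ l ∧ p (ys.foldl min y) = true ∧
      ∀ z ∈ l, p z = true → ys.foldl min y ≤ z := by
  have hmemf : ys.foldl min y ∈ y :: ys := by
    rcases PySem.List.foldl_min_mem ys y with h | h
    · rw [h]; simp
    · simp [h]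
  have hmeml : ys.foldl min y ∈ l.filter p := by rw [hf]; exact hmemf
  have hle := PySem.List.foldl_min_le ys y
  refine ⟨(List.mem_filter.1 hmeml).1, (List.mem_filter.1 hmeml).2, ?_⟩
  intro z hz hpz
  have : z ∈ y :: ys := by rw [← hf]; exact List.mem_filter.2 ⟨hz, hpz⟩
  rcases List.mem_cons.1 this with rfl | h
  · exact hle.1
  · exact hle.2 z h

-- for a class-minimal member m, A's "count from m up" is the whole class count
theorem dt_tc_eq_cnt {s : Int} {L nums : List Int} (hs : s ≠ 0) (hperm : L.Perm nums)
    {m : Int} (hmin : ∀ y ∈ nums, PySem.Int.mod y s = PySem.Int.mod m s → m ≤ y) :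
    L.countP (fun y => decide (m ≤ y ∧ s ∣ (y - m)))
      = nums.countP (fun x => decide (PySem.Int.mod x s = PySem.Int.mod m s)) := by
  rw [hperm.countP_eq]
  apply List.countP_congr
  intro x hx
  simp only [decide_eq_true_eq]
  constructor
  · intro ⟨_, hdvd⟩
    exact (dtMod_sub_iff hs x m).2 hdvd
  · intro hmod
    exact ⟨hmin x hx hmod, (dtMod_sub_iff hs x m).1 hmod⟩

-- ===== VERDICT (by name: the statement is the Claim_ definition above) =====
theorem destroyTargets_spec : Claim_equal_destroyTargets := by
  unfold Claim_equal_destroyTargets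
  intro nums s _ hpre
  unfold Spec_destroyTargets
  by_cases hnil : nums = []
  · subst hnil; rfl
  · have hs : s ≠ 0 := hpre.resolve_right hnil
    set L := PySem.List.sorted nums (fun x => x) false with hLdef
    have hperm : L.Perm nums := PySem.List.sorted_perm nums _ false
    have hsorted : L.Pairwise (· ≤ ·) := PySem.List.sorted_pairwise nums _
    -- A's result
    have hA : destroyTargets nums s = (dtPick (dtTl s L L)).map Prod.snd := by
      show (L.foldl (dtStep L s) (0, none, PySem.Set.empty)).2.1 = _
      have hinit : ((0 : Int), (none : Option Int), (PySem.Set.empty : PySem.Set Int))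
          = dtEnc (dtPick (dtTl s L [])) (PySem.Set.ofList []) := rfl
      rw [hinit, dt_afold_inv hsorted L [] rfl]
      rfl
    -- B's result
    have hB : destroyTargets_alt nums s
        = (dtPick ((nums.foldl (bGroupStep s) PySem.Dict.empty).values)).map Prod.snd := by
      show (match dtPick ((nums.foldl (bGroupStep s) PySem.Dict.empty).values) with
            | none => none
            | some p => some p.2) = _
      cases dtPick ((nums.foldl (bGroupStep s) PySem.Dict.empty).values) <;> rfl
    rw [hA, hB]
    -- the two candidate lists have the same best element
    suffices h : dtPick (dtTl s L L) = dtPick ((nums.foldl (bGroupStep s) PySem.Dict.empty).values) by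
      rw [h]
    have hLnil : L ≠ [] := by
      intro h
      rw [h] at hperm
      exact hnil hperm.nil_eq.symm
    cases hpk : dtPick (dtTl s L L) with
    | none =>
      exfalso
      have := (dtPick_none_iff _).1 hpk
      unfold dtTl at this
      rcases List.exists_mem_of_ne_nil L hLnil with ⟨x, hx⟩
      have : (PySem.Set.ofList L) = [] := List.map_eq_nil_iff.1 this
      have hm := (PySem.Set.mem_ofList _ _).2 hx
      rw [this] at hm
      simp at hm
    | some q =>
      obtain ⟨hqmem, hqmin⟩ := dtPick_min hpk
      obtain ⟨v, hv, hveq⟩ := List.mem_map.1 hqmem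
      have hvL : v ∈ L := (PySem.Set.mem_ofList _ _).1 hv
      have hvnums : v ∈ nums := hperm.mem_iff.1 hvL
      have hq1 : q.1 = (L.countP (fun y => decide (v ≤ y ∧ s ∣ (y - v))) : Int) := by
        rw [← hveq]
      have hq2 : q.2 = v := by rw [← hveq]
      -- v is the minimum of its class
      have hclassmin : ∀ y ∈ nums, PySem.Int.mod y s = PySem.Int.mod v s → v ≤ y := by
        intro y hy hmody
        by_contra hlt
        have hyL : y ∈ L := hperm.mem_iff.2 hy
        have htle : L.countP (fun z => decide (v ≤ z ∧ s ∣ (z - v)))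
            ≤ L.countP (fun z => decide (y ≤ z ∧ s ∣ (z - y))) := by
          apply List.countP_mono_left
          intro z _ hz
          simp only [decide_eq_true_eq] at hz ⊢
          refine ⟨by omega, ?_⟩
          have h1 : s ∣ (v - y) := (dtMod_sub_iff hs v y).1 hmody.symm
          have : z - y = (z - v) + (v - y) := by ring
          rw [this]
          exact dvd_add hz.2 h1
        have hmemy : ((L.countP (fun z => decide (y ≤ z ∧ s ∣ (z - y))) : Int), y) ∈ dtTl s L L :=
          List.mem_map.2 ⟨y, (PySem.Set.mem_ofList _ _).2 hyL, rfl⟩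
        have := hqmin _ hmemy
        unfold dtBetter at this
        simp only [not_or, not_lt, not_and] at this
        omega
      -- every value the dict holds is a candidate of A's list, so none beats q
      have hvals := bGroup_values s nums
      have hallvals : ∀ e ∈ (nums.foldl (bGroupStep s) PySem.Dict.empty).values, ¬ dtBetter e q := by
        intro e he
        rw [hvals] at he
        obtain ⟨r, hrm, hre⟩ := List.mem_map.1 he
        obtain ⟨x0, hx0, hx0r⟩ := List.mem_map.1 ((PySem.Set.mem_ofList _ _).1 hrm)
        have hx0f : x0 ∈ nums.filter (fun x => decide (PySem.Int.mod x s = r)) :=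
          List.mem_filter.2 ⟨hx0, by simp [hx0r]⟩
        cases hf : nums.filter (fun x => decide (PySem.Int.mod x s = r)) with
        | nil => rw [hf] at hx0f; simp at hx0f
        | cons y ys =>
          rw [hf] at hre
          have hre2 : ((((ys.length : Nat) : Int) + 1, ys.foldl min y) : Int × Int) = e := hre
          obtain ⟨hmn_mem, hmn_p, hmn_min⟩ := dt_filter_min hf
          set mn := ys.foldl min y with hmn
          have hmnr : PySem.Int.mod mn s = r := by simpa using hmn_p
          have hmnmin : ∀ z ∈ nums, PySem.Int.mod z s = PySem.Int.mod mn s → mn ≤ z := by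
            intro z hz hmz
            exact hmn_min z hz (by simp [hmz, hmnr])
          -- e is exactly A's candidate for mn
          have hcount : (ys.length : Int) + 1
              = (L.countP (fun z => decide (mn ≤ z ∧ s ∣ (z - mn))) : Int) := by
            rw [dt_tc_eq_cnt hs hperm hmnmin]
            have : nums.countP (fun x => decide (PySem.Int.mod x s = PySem.Int.mod mn s))
                = (nums.filter (fun x => decide (PySem.Int.mod x s = r))).length := by
              rw [List.countP_eq_length_filter]
              congr 1
              apply List.filter_congr
              intro z _
              simp [hmnr]
            rw [this, hf]
            simp
        
          have he' : e = ((L.countP (fun z => decide (mn ≤ z ∧ s ∣ (z - mn))) : Int), mn) := by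
            rw [← hre2, hcount]
          have : e ∈ dtTl s L L := by
            rw [he']
            exact List.mem_map.2 ⟨mn, (PySem.Set.mem_ofList _ _).2 (hperm.mem_iff.2 hmn_mem), rfl⟩
          exact hqmin e this
      -- q itself is among the dict's values
      have hqval : q ∈ (nums.foldl (bGroupStep s) PySem.Dict.empty).values := by
        rw [hvals]
        set r := PySem.Int.mod v s with hrdef
        have hrm : r ∈ PySem.Set.ofList (nums.map (fun x => PySem.Int.mod x s)) :=
          (PySem.Set.mem_ofList _ _).2 (List.mem_map.2 ⟨v, hvnums, rfl⟩)
        refine List.mem_map.2 ⟨r, hrm, ?_⟩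
        have hvf : v ∈ nums.filter (fun x => decide (PySem.Int.mod x s = r)) :=
          List.mem_filter.2 ⟨hvnums, by simp [← hrdef]⟩
        cases hf : nums.filter (fun x => decide (PySem.Int.mod x s = r)) with
        | nil => rw [hf] at hvf; simp at hvf
        | cons y ys =>
          obtain ⟨hmn_mem, hmn_p, hmn_min⟩ := dt_filter_min hf
          set mn := ys.foldl min y with hmn
          have hmnr : PySem.Int.mod mn s = r := by simpa using hmn_p
          have hmn_eq_v : mn = v := by
            have h1 : mn ≤ v := by
              rw [hf] at hvf
              rcases List.mem_cons.1 hvf with rfl | h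
              · exact (PySem.List.foldl_min_le ys v).1
              · exact (PySem.List.foldl_min_le ys y).2 v h
            have h2 : v ≤ mn := hclassmin mn hmn_mem hmnr
            omega
          have hmnmin : ∀ z ∈ nums, PySem.Int.mod z s = PySem.Int.mod mn s → mn ≤ z := by
            intro z hz hmz
            exact hmn_min z hz (by simp [hmz, hmnr])
          have hcount : (ys.length : Int) + 1
              = (L.countP (fun z => decide (mn ≤ z ∧ s ∣ (z - mn))) : Int) := by
            rw [dt_tc_eq_cnt hs hperm hmnmin]
            have : nums.countP (fun x => decide (PySem.Int.mod x s = PySem.Int.mod mn s))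
                = (nums.filter (fun x => decide (PySem.Int.mod x s = r))).length := by
              rw [List.countP_eq_length_filter]
              congr 1
              apply List.filter_congr
              intro z _
              simp [hmnr]
            rw [this, hf]
            simp
          show ((((ys.length : Nat) : Int) + 1, mn) : Int × Int) = q
          rw [hcount, hmn_eq_v]
          exact hveq
      exact (dtPick_eq_of hqval hallvals).symm
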